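-- pv_equiv track=rewrite | github.com/flexxui/flexx | flexx/webruntime/_manage.py | versionstring
-- ===== SOURCE A (Python) =====
-- def versionstring(version):
--     """ Given a version string or tuple, produce a version string that looks
--     a bit funny but can be string-compared to order versions. Works with
--     semver. The only restriction is that any part (between two dots) may not
--     be more than 9 chars long.
--     """
--     if isinstance(version, (tuple, list)):
--         version = '.'.join(version)
--     if not isinstance(version, str):
--         raise TypeError('Version must be a tuple or string.')
--     version = version.strip().lower()
--     version = version.replace(' ', '').replace('\t', '').replace('~', '')
--
--     if version == 'latest':
--         return '~~'
--
--     isnumeric = True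
--     anchor = 0
--     parts = []
--
--     def add_part(i):
--         part = version[anchor:i]
--         if len(part) > 9:
--             raise ValueError('Version parts can be at most 9 chars')
--         elif part.isnumeric():
--             parts.append('~' + part.rjust(9, ' '))
--         elif part:
--             parts.append(' ' + part.rjust(9, ' '))
--
--     for i in range(len(version)):
--         c = version[i]
--         if i == anchor:
--             isnumeric = c.isnumeric()
--         if c == '.':
--             add_part(i)
--             anchor = i + 1
--         elif isnumeric and not c.isnumeric():
--             add_part(i)
--             anchor = i
--             isnumeric = False
--
--     add_part(len(version))
--     return '.'.join(parts) + '.~'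
-- ===== SOURCE B (Python) =====
-- def versionstring(version):
--     if isinstance(version, (tuple, list)):
--         version = '.'.join(version)
--     if not isinstance(version, str):
--         raise TypeError('Version must be a tuple or string.')
--     version = version.strip().lower()
--     version = version.replace(' ', '').replace('\t', '').replace('~', '')
--
--     if version == 'latest':
--         return '~~'
--
--     parts = []
--     for seg in version.split('.'):
--         if seg and seg[0].isnumeric():
--             k = 1
--             while k < len(seg) and seg[k].isnumeric():
--                 k += 1
--             subs = [seg[:k], seg[k:]]
--         else:
--             subs = [seg]
--         for sub in subs:
--             if len(sub) > 9:
--                 raise ValueError('Version parts can be at most 9 chars')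
--             elif sub.isnumeric():
--                 parts.append('~' + sub.rjust(9, ' '))
--             elif sub:
--                 parts.append(' ' + sub.rjust(9, ' '))
--     return '.'.join(parts) + '.~'
-- ===== Notes on version B (the rewrite author's own statement) =====
-- stated objective: alternative
-- what changed: Replaces A's single stateful char-index scan (anchor index plus isnumeric flag, with an inner add_part slicing version[anchor:i]) by a two-level decomposition: split the normalized string at dots, split off the maximal leading digit run of each digit-starting segment, then format each subpart; the preamble (strip/lower/replace and the latest-shortcut) is kept.
import Mathlib
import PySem

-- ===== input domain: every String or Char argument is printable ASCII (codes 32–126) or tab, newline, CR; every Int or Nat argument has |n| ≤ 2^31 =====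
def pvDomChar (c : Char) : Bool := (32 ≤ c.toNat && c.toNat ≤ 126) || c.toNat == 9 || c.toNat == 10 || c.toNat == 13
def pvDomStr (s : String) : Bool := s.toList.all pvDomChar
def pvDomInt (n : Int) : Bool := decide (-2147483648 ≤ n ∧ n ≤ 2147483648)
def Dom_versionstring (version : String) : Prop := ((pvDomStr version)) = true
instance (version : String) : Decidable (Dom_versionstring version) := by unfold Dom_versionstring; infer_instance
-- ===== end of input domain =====

-- B replaces A's stateful char-index scan (anchor/isnumeric flags) by a dot-split plus a
-- leading-digit-run decomposition of each segment; same cost, different decomposition ("alternative").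
-- On the ASCII input domain str.isnumeric coincides with PySem.Chars.isdigit, which both ports use.
-- Where the Python raises ValueError (a version part longer than 9 chars) both ports return "";
-- those inputs are excluded by Pre_versionstring.

-- ===== PORT A =====
-- part.rjust(9, ' ')
def pvRjust9 (part : List Char) : List Char := List.replicate (9 - part.length) ' ' ++ part

-- A's local add_part(i): version[anchor:i]; none = the ValueError branch
def pvAddPartA (version : List Char) (anchor i : Nat) (parts : List (List Char)) :
    Option (List (List Char)) :=
  let part := PySem.List.slice version (some (anchor : Int)) (some (i : Int))
  if part.length > 9 then none
  else if PySem.Chars.strIsdigit part then some (parts ++ ['~' :: pvRjust9 part])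
  else if !part.isEmpty then some (parts ++ [' ' :: pvRjust9 part])
  else some parts

-- one iteration of A's `for i in range(len(version))` loop (c = version[i] is the paired char)
def pvStepA (version : List Char) (st : Option (Bool × Nat × List (List Char))) (p : Char × Nat) :
    Option (Bool × Nat × List (List Char)) :=
  match st with
  | none => none
  | some (isnum, anchor, parts) =>
    let c := p.1
    let i := p.2
    let isnum1 := if i = anchor then PySem.Chars.isdigit c else isnum
    if c = '.' then (pvAddPartA version anchor i parts).map (fun ps => (isnum1, i + 1, ps))
    else if isnum1 && !(PySem.Chars.isdigit c) then
      (pvAddPartA version anchor i parts).map (fun ps => (false, i, ps))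
    else some (isnum1, anchor, parts)

-- the loop plus the final add_part(len(version))
def pvCoreA (cs : List Char) : Option (List (List Char)) :=
  match cs.zipIdx.foldl (pvStepA cs) (some (true, 0, [])) with
  | none => none
  | some (_, anchor, parts) => pvAddPartA cs anchor cs.length parts

def versionstring (version : String) : String :=
  -- version : String, so the tuple/isinstance branches of the Python never fire
  let cs := PySem.Chars.replace (PySem.Chars.replace (PySem.Chars.replace
      (PySem.Chars.lower (PySem.Chars.strip version.toList)) [' '] []) ['\t'] []) ['~'] []
  if cs = "latest".toList then "~~"
  else
    match pvCoreA cs with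
    | none => ""   -- Python raises ValueError here; excluded by Pre_versionstring
    | some parts => String.ofList (PySem.Chars.join ['.'] parts ++ ['.', '~'])

-- ===== PORT B =====
-- the `while k < len(seg) and seg[k].isnumeric()` count of leading digits
def pvLeadNum : List Char → Nat
  | [] => 0
  | c :: r => if PySem.Chars.isdigit c then pvLeadNum r + 1 else 0

-- subparts of one dot-separated segment: [seg[:k], seg[k:]] or [seg]
def pvSubsB (seg : List Char) : List (List Char) :=
  match seg with
  | [] => [[]]
  | c :: _ =>
    if PySem.Chars.isdigit c then
      let k := pvLeadNum seg
      [seg.take k, seg.drop k]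
    else [seg]

-- the body of B's inner `for sub in subs` loop; none = the ValueError branch
def pvFmtB (parts : Option (List (List Char))) (sub : List Char) : Option (List (List Char)) :=
  match parts with
  | none => none
  | some ps =>
    if sub.length > 9 then none
    else if PySem.Chars.strIsdigit sub then some (ps ++ ['~' :: pvRjust9 sub])
    else if !sub.isEmpty then some (ps ++ [' ' :: pvRjust9 sub])
    else some ps

def pvCoreB (cs : List Char) : Option (List (List Char)) :=
  ((PySem.Chars.splitOn cs ['.']).flatMap pvSubsB).foldl pvFmtB (some [])

def versionstring_alt (version : String) : String :=
  let cs := PySem.Chars.replace (PySem.Chars.replace (PySem.Chars.replace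
      (PySem.Chars.lower (PySem.Chars.strip version.toList)) [' '] []) ['\t'] []) ['~'] []
  if cs = "latest".toList then "~~"
  else
    match pvCoreB cs with
    | none => ""   -- Python raises ValueError here; excluded by Pre_versionstring
    | some parts => String.ofList (PySem.Chars.join ['.'] parts ++ ['.', '~'])

-- ===== PRECONDITION & SPEC =====
-- Excludes exactly the inputs on which the Python raises ValueError: after normalisation, some
-- '.'-separated segment has a leading digit run longer than 9 or a remainder longer than 9.
def Pre_versionstring (version : String) : Prop :=
  let v := PySem.Chars.replace (PySem.Chars.replace (PySem.Chars.replace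
      (PySem.Chars.lower (PySem.Chars.strip version.toList)) [' '] []) ['\t'] []) ['~'] []
  v = "latest".toList ∨
    ∀ seg ∈ PySem.Chars.splitOn v ['.'],
      (seg.takeWhile PySem.Chars.isdigit).length ≤ 9 ∧
      (seg.dropWhile PySem.Chars.isdigit).length ≤ 9

instance (version : String) : Decidable (Pre_versionstring version) := by
  unfold Pre_versionstring; infer_instance

def pvWitness_versionstring : String := "1.2rc1"

def Spec_versionstring (version : String) (out : String) : Prop := out = versionstring_alt version
instance (version : String) (out : String) : Decidable (Spec_versionstring version out) := by
  unfold Spec_versionstring; infer_instance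

-- ===== CLAIM (what is proved, stated in full; the proofs are below) =====
def Claim_equal_versionstring : Prop :=
  ∀ (version : String), Dom_versionstring version → Pre_versionstring version →
    Spec_versionstring version (versionstring version)

-- ===== LEMMAS AND PROOFS =====

-- structural single-char split at dots (proof-side mirror of splitOn): (first segment, later segments)
def pvSplitD : List Char → List Char × List (List Char)
  | [] => ([], [])
  | c :: r =>
    let (s, ss) := pvSplitD r
    if c = '.' then ([], s :: ss) else (c :: s, ss)

-- proof-side scanner: A's loop with the current part carried explicitly instead of anchor indices
def pvScan : List Char → Bool → List Char → Option (List (List Char)) → Option (List (List Char))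
  | [], _, cur, parts => pvFmtB parts cur
  | c :: r, isn, cur, parts =>
    let isnum1 := if cur.isEmpty then PySem.Chars.isdigit c else isn
    if c = '.' then pvScan r isnum1 [] (pvFmtB parts cur)
    else if isnum1 && !(PySem.Chars.isdigit c) then pvScan r false [c] (pvFmtB parts cur)
    else pvScan r isnum1 (cur ++ [c]) parts

def pvProcSegs (segs : List (List Char)) (parts : Option (List (List Char))) :
    Option (List (List Char)) :=
  (segs.flatMap pvSubsB).foldl pvFmtB parts

def pvModeSubs (isn : Bool) (cur s : List Char) : List (List Char) :=
  if cur.isEmpty then pvSubsB s else if isn then pvSubsB (cur ++ s) else [cur ++ s]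

def pvRunA (cs : List Char) (l : List (Char × Nat)) (st : Option (Bool × Nat × List (List Char))) :
    Option (List (List Char)) :=
  match l.foldl (pvStepA cs) st with
  | none => none
  | some (_, anchor, parts) => pvAddPartA cs anchor cs.length parts

lemma pvFmtB_none (sub : List Char) : pvFmtB none sub = none := rfl

lemma pvFmtB_nil (parts : Option (List (List Char))) : pvFmtB parts [] = parts := by
  cases parts <;> rfl

lemma pvFoldl_stepA_none (cs : List Char) (l : List (Char × Nat)) :
    l.foldl (pvStepA cs) none = none := by
  induction l with
  | nil => rfl
  | cons p l ih => simpa [pvStepA] using ih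

lemma pvLeadNum_all (cur : List Char) (h : ∀ c ∈ cur, PySem.Chars.isdigit c = true) :
    pvLeadNum cur = cur.length := by
  induction cur with
  | nil => rfl
  | cons c r ih =>
    simp only [pvLeadNum, h c (by simp), if_pos]
    simp [ih fun x hx => h x (by simp [hx])]

lemma pvLeadNum_all_append (cur : List Char) (c : Char) (t : List Char)
    (h : ∀ x ∈ cur, PySem.Chars.isdigit x = true) (hc : PySem.Chars.isdigit c = false) :
    pvLeadNum (cur ++ c :: t) = cur.length := by
  induction cur with
  | nil => simp [pvLeadNum, hc]
  | cons d r ih =>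
    simp only [List.cons_append, pvLeadNum, h d (by simp), if_pos]
    simp [ih fun x hx => h x (by simp [hx])]

lemma pvSubsB_all_digits (cur : List Char) (hne : cur ≠ [])
    (h : ∀ c ∈ cur, PySem.Chars.isdigit c = true) : pvSubsB cur = [cur, []] := by
  cases cur with
  | nil => exact absurd rfl hne
  | cons c r =>
    simp only [pvSubsB, h c (by simp), if_pos]
    rw [pvLeadNum_all _ h]
    simp

lemma pvSubsB_digits_append (cur : List Char) (c : Char) (t : List Char) (hne : cur ≠ [])
    (h : ∀ x ∈ cur, PySem.Chars.isdigit x = true) (hc : PySem.Chars.isdigit c = false) :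
    pvSubsB (cur ++ c :: t) = [cur, c :: t] := by
  cases cur with
  | nil => exact absurd rfl hne
  | cons d r =>
    simp only [List.cons_append, pvSubsB, h d (by simp), if_pos]
    rw [show d :: (r ++ c :: t) = (d :: r) ++ c :: t from rfl,
      pvLeadNum_all_append _ _ _ h hc]
    simp [List.take_left', List.drop_left']

lemma pvProcSegs_cons (s : List Char) (ss : List (List Char))
    (parts : Option (List (List Char))) :
    pvProcSegs (s :: ss) parts = pvProcSegs ss ((pvSubsB s).foldl pvFmtB parts) := by
  simp [pvProcSegs, List.foldl_append]

-- splitOn.go with one-char separator computes pvSplitD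
lemma pvGo_dot (fuel : Nat) : ∀ (l cur : List Char) (acc : List (List Char)),
    l.length < fuel →
    PySem.Chars.splitOn.go ['.'] fuel l cur acc
      = acc.reverse ++ (cur.reverse ++ (pvSplitD l).1) :: (pvSplitD l).2 := by
  induction fuel with
  | zero => intro l cur acc h; omega
  | succ f ih =>
    intro l cur acc h
    cases l with
    | nil => simp [PySem.Chars.splitOn.go, pvSplitD]
    | cons c rest =>
      by_cases hc : c = '.'
      · subst hc
        rw [show PySem.Chars.splitOn.go ['.'] (f + 1) ('.' :: rest) cur acc
            = PySem.Chars.splitOn.go ['.'] f rest [] (cur.reverse :: acc) by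
          simp [PySem.Chars.splitOn.go, List.isPrefixOf]]
        rw [ih rest [] (cur.reverse :: acc) (by simpa using h)]
        simp [pvSplitD]
      · rw [show PySem.Chars.splitOn.go ['.'] (f + 1) (c :: rest) cur acc
            = PySem.Chars.splitOn.go ['.'] f rest (c :: cur) acc by
          simp [PySem.Chars.splitOn.go, List.isPrefixOf, Ne.symm hc]]
        rw [ih rest (c :: cur) acc (by simpa using h)]
        simp [pvSplitD, hc]

lemma pvSplitOn_dot (cs : List Char) :
    PySem.Chars.splitOn cs ['.'] = (pvSplitD cs).1 :: (pvSplitD cs).2 := by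
  rw [PySem.Chars.splitOn, pvGo_dot (cs.length + 1) cs [] [] (by omega)]
  simp

-- the scanner equals B's split-based processing
lemma pvScan_eq (rest : List Char) : ∀ (isn : Bool) (cur : List Char)
    (parts : Option (List (List Char))),
    (cur ≠ [] → isn = true → ∀ c ∈ cur, PySem.Chars.isdigit c = true) →
    pvScan rest isn cur parts
      = pvProcSegs (pvSplitD rest).2
          ((pvModeSubs isn cur (pvSplitD rest).1).foldl pvFmtB parts) := by
  induction rest with
  | nil =>
    intro isn cur parts h
    by_cases hc : cur = []
    · subst hc
      simp [pvScan, pvModeSubs, pvSubsB, pvProcSegs, pvFmtB_nil, pvSplitD]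
    · cases isn with
      | false =>
        simp [pvScan, pvModeSubs, pvSplitD, pvProcSegs, hc]
      | true =>
        simp [pvScan, pvModeSubs, pvSplitD, pvProcSegs, hc,
          pvSubsB_all_digits cur hc (h hc rfl), pvFmtB_nil]
  | cons c r ih =>
    intro isn cur parts h
    rcases hsp : pvSplitD r with ⟨s, ss⟩
    have hdotnd : PySem.Chars.isdigit '.' = false := by decide
    by_cases hdot : c = '.'
    · subst hdot
      by_cases hc : cur = []
      · subst hc
        simp only [pvScan, List.isEmpty_nil, if_true, hdotnd, pvFmtB_nil]
        rw [ih _ _ _ (fun h' => absurd rfl h')]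
        simp [pvSplitD, hsp, pvModeSubs, pvSubsB, pvProcSegs_cons, pvFmtB_nil]
      · have hie : cur.isEmpty = false := by simpa using hc
        cases isn with
        | false =>
          simp only [pvScan, hie, Bool.false_eq_true, if_false]
          rw [ih _ _ _ (fun h' => absurd rfl h')]
          simp [pvSplitD, hsp, pvModeSubs, hie, pvProcSegs_cons]
        | true =>
          simp only [pvScan, hie, Bool.false_eq_true, if_false]
          rw [ih _ _ _ (fun h' => absurd rfl h')]
          simp only [pvSplitD, hsp, pvModeSubs, hie, Bool.false_eq_true, if_false,
            if_true, List.append_nil, pvProcSegs_cons]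
          rw [pvSubsB_all_digits cur hc (h hc rfl)]
          simp [pvFmtB_nil]
    · have hsplit : pvSplitD (c :: r) = (c :: s, ss) := by simp [pvSplitD, hsp, hdot]
      by_cases hc : cur = []
      · subst hc
        by_cases hd : PySem.Chars.isdigit c = true
        · -- fresh, digit head: continue in digit mode with cur = [c]
          simp only [pvScan, List.isEmpty_nil, if_true, hdot, if_false, hd,
            Bool.true_and, Bool.not_true, Bool.false_eq_true, List.nil_append]
          rw [ih true [c] parts (fun _ _ => by simpa using hd)]
          simp [hsplit, pvModeSubs, pvSubsB, hd, hsp]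
        · -- fresh, non-digit head: continue in non-digit mode with cur = [c]
          have hd' : PySem.Chars.isdigit c = false := by simpa using hd
          simp only [pvScan, List.isEmpty_nil, if_true, hdot, if_false, hd',
            Bool.false_and, Bool.false_eq_true, List.nil_append]
          rw [ih false [c] parts (fun _ hcontra => by simp at hcontra)]
          simp [hsplit, pvModeSubs, hsp, pvSubsB, hd']
      · have hie : cur.isEmpty = false := by simpa using hc
        cases isn with
        | false =>
          simp only [pvScan, hie, Bool.false_eq_true, if_false, hdot,
            Bool.false_and]
          rw [ih false (cur ++ [c]) parts (fun _ hcontra => by simp at hcontra)]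
          simp [hsplit, pvModeSubs, hsp, hie]
        | true =>
          have hall := h hc rfl
          by_cases hd : PySem.Chars.isdigit c = true
          · simp only [pvScan, hie, Bool.false_eq_true, if_false, hdot, hd,
              Bool.true_and, Bool.not_true]
            rw [ih true (cur ++ [c]) parts
              (fun _ _ x hx => by
                rcases List.mem_append.mp hx with h1 | h1
                · exact hall x h1
                · simp at h1; subst h1; exact hd)]
            simp only [hsplit, pvModeSubs, hie, Bool.false_eq_true, if_false, if_true]
            have hie2 : (cur ++ [c]).isEmpty = false := by simp
            simp [hie2, List.append_assoc, hsp]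
          · have hd' : PySem.Chars.isdigit c = false := by simpa using hd
            simp only [pvScan, hie, Bool.false_eq_true, if_false, hdot, hd',
              Bool.not_false, Bool.and_true]
            rw [ih false [c] (pvFmtB parts cur) (fun _ hcontra => by simp at hcontra)]
            simp only [hsplit, pvModeSubs, hie, Bool.false_eq_true, if_false, if_true,
              List.singleton_append]
            rw [pvSubsB_digits_append cur c s hc hall hd']
            simp [hsp]

lemma pvScan_none (rest : List Char) : ∀ (isn : Bool) (cur : List Char),
    pvScan rest isn cur none = none := by
  induction rest with
  | nil => intro isn cur; rfl
  | cons c r ih =>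
    intro isn cur
    simp only [pvScan, pvFmtB_none]
    split_ifs <;> exact ih _ _

lemma pvAddPartA_eq (cs : List Char) (anchor i : Nat) (parts : List (List Char)) :
    pvAddPartA cs anchor i parts = pvFmtB (some parts) ((cs.take i).drop anchor) := by
  rw [pvAddPartA, pvFmtB, PySem.List.slice_natCast, ← List.drop_take]

-- A's indexed fold equals the scanner
lemma pvRunA_eq_scan (cs rest : List Char) : ∀ (j : Nat) (isn : Bool)
    (anchor : Nat) (parts : List (List Char)),
    cs.drop j = rest → anchor ≤ j → j ≤ cs.length →
    pvRunA cs (rest.zipIdx j) (some (isn, anchor, parts))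
      = pvScan rest isn ((cs.take j).drop anchor) (some parts) := by
  induction rest with
  | nil =>
    intro j isn anchor parts hdrop haj hjl
    have hj : j = cs.length := by
      have := congrArg List.length hdrop
      simp at this
      omega
    subst hj
    simp only [List.zipIdx_nil, pvRunA, List.foldl_nil, pvScan]
    exact pvAddPartA_eq cs anchor cs.length parts
  | cons c rest ih =>
    intro j isn anchor parts hdrop haj hjl
    have hjlt : j < cs.length := by
      have := congrArg List.length hdrop
      simp at this
      omega
    have hdrop' : cs.drop (j + 1) = rest := by
      have h0 := congrArg List.tail hdrop
      simpa [List.tail_drop] using h0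
    have hget : cs[j]? = some c := by
      have h0 := congrArg (fun l => l[0]?) hdrop
      simp only [List.getElem?_drop] at h0
      simpa using h0
    have htake : cs.take (j + 1) = cs.take j ++ [c] := by
      rw [List.take_add_one, hget]
      rfl
    have hlen : (cs.take j).length = j := by simp; omega
    have hcur : ((cs.take j).drop anchor).isEmpty = decide (j = anchor) := by
      rcases Nat.eq_or_lt_of_le haj with h | h
      · subst h
        simp [List.drop_of_length_le, hlen]
      · have : ((cs.take j).drop anchor).length = j - anchor := by simp; omega
        rcases heq : (cs.take j).drop anchor with _ | ⟨x, xs⟩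
        · rw [heq] at this; simp at this; omega
        · simp only [List.isEmpty_cons]
          have : ¬ j = anchor := by omega
          simp [this]
    have hisnum : (if ((cs.take j).drop anchor).isEmpty then PySem.Chars.isdigit c else isn)
        = (if j = anchor then PySem.Chars.isdigit c else isn) := by
      rw [hcur]; by_cases hja : j = anchor <;> simp [hja]
    rw [List.zipIdx_cons,
      show pvRunA cs ((c, j) :: rest.zipIdx (j + 1)) (some (isn, anchor, parts))
        = pvRunA cs (rest.zipIdx (j + 1)) (pvStepA cs (some (isn, anchor, parts)) (c, j)) from rfl]
    simp only [pvScan, hisnum, pvStepA]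
    set isnum1 := if j = anchor then PySem.Chars.isdigit c else isn with hisnum1
    by_cases hdot : c = '.'
    · subst hdot
      rw [pvAddPartA_eq cs anchor j parts]
      rcases hfmt : pvFmtB (some parts) ((cs.take j).drop anchor) with _ | ps
      · simp [pvRunA, pvFoldl_stepA_none, pvScan_none]
      · simp only [if_true, Option.map_some]
        rw [ih (j + 1) isnum1 (j + 1) ps hdrop' (by omega) (by omega)]
        congr 1
        rw [List.drop_of_length_le]
        simp
    · simp only [hdot, if_false]
      by_cases hsplitb : (isnum1 && !PySem.Chars.isdigit c) = true
      · simp only [hsplitb, if_true]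
        rw [pvAddPartA_eq cs anchor j parts]
        rcases hfmt : pvFmtB (some parts) ((cs.take j).drop anchor) with _ | ps
        · simp [pvRunA, pvFoldl_stepA_none, pvScan_none]
        · simp only [Option.map_some]
          rw [ih (j + 1) false j ps hdrop' (by omega) (by omega)]
          congr 1
          rw [htake, List.drop_append_of_le_length (by omega),
            List.drop_of_length_le (by omega)]
          rfl
      · simp only [hsplitb, if_false, Bool.false_eq_true]
        rw [ih (j + 1) isnum1 anchor parts hdrop' (by omega) (by omega)]
        congr 1
        rw [htake, List.drop_append_of_le_length (by omega)]

lemma pvCoreA_eq_coreB (cs : List Char) : pvCoreA cs = pvCoreB cs := by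
  have h1 : pvCoreA cs = pvRunA cs (cs.zipIdx) (some (true, 0, [])) := rfl
  rw [h1, show cs.zipIdx = cs.zipIdx 0 from rfl,
    pvRunA_eq_scan cs cs 0 true 0 [] (by simp) (by omega) (by omega)]
  simp only [List.take_zero, List.drop_nil]
  rw [pvScan_eq cs true [] (some []) (by intro h; exact absurd rfl h)]
  rw [pvCoreB, pvSplitOn_dot]
  simp [pvModeSubs, pvProcSegs, List.foldl_append]

-- ===== VERDICT (by name: the statement is the Claim_ definition above) =====
theorem versionstring_spec : Claim_equal_versionstring := by
  intro version _ _
  unfold Spec_versionstring versionstring versionstring_alt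
  simp only [pvCoreA_eq_coreB]
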